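-- pv_equiv track=rewrite | github.com/suaveshot/americal-patrol-vps | watchdog/watchdog.py | _first_error_in_last_run
-- ===== SOURCE A (Python) =====
-- def _first_error_in_last_run(lines):
--     """Return the first ERROR line in the last run block, or None."""
--     start = 0
--     for i, line in enumerate(lines):
--         l = line.lower()
--         if "starting" in l or "watchdog run" in l:
--             start = i
--     for line in lines[start:]:
--         up = line.upper()
--         if "ERROR:" in up or "TRACEBACK" in up:
--             return line.strip()[:200]
--     return None
-- ===== SOURCE B (Python) =====
-- def _first_error_in_last_run(lines):
--     """Return the first ERROR line in the last run block, or None."""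
--     candidate = None
--     for line in lines:
--         l = line.lower()
--         if "starting" in l or "watchdog run" in l:
--             candidate = None
--         up = line.upper()
--         if ("ERROR:" in up or "TRACEBACK" in up) and candidate is None:
--             candidate = line.strip()[:200]
--     return candidate
-- ===== Notes on version B (the rewrite author's own statement) =====
-- stated objective: alternative
-- what changed: Replaced A's two passes (find the last run-start index by enumerate, then rescan the suffix with an early return) by one pass threading a candidate that is reset to None at each run-start marker and filled by the first error line since that reset.
import Mathlib
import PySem

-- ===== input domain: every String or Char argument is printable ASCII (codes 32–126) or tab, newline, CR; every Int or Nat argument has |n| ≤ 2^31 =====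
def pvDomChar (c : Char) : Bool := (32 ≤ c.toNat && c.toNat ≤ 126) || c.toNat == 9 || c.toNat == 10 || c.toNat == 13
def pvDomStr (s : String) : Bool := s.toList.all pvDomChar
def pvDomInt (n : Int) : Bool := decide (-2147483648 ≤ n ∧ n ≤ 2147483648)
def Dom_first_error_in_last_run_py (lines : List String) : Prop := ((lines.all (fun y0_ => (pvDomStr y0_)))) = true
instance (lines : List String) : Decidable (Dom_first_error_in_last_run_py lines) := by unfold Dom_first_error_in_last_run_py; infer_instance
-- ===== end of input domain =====

-- B replaces A's two passes (last start-marker index, then rescan of the suffix) by one pass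
-- threading a candidate reset at each start marker; same cost, different decomposition.


-- ===== PORT A =====
-- A's second loop: scan forward, return first ERROR line stripped and truncated to 200.
def pvScanErr : List String → Option String
  | [] => none
  | line :: rest =>
    let up := PySem.Str.upper line
    if PySem.Str.isIn "ERROR:" up || PySem.Str.isIn "TRACEBACK" up then
      some (PySem.Str.slice (PySem.Str.strip line) none (some 200))
    else pvScanErr rest

def first_error_in_last_run_py (lines : List String) : Option String :=
  let start : Int := (PySem.List.enumerate lines 0).foldl
    (fun s p =>
      let l := PySem.Str.lower p.2
      if PySem.Str.isIn "starting" l || PySem.Str.isIn "watchdog run" l then p.1 else s) 0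
  pvScanErr (PySem.List.slice lines (some start) none)

-- ===== PORT B =====
def first_error_in_last_run_py_alt (lines : List String) : Option String :=
  lines.foldl
    (fun candidate line =>
      let l := PySem.Str.lower line
      let c1 := if PySem.Str.isIn "starting" l || PySem.Str.isIn "watchdog run" l then
          none else candidate
      let up := PySem.Str.upper line
      if (PySem.Str.isIn "ERROR:" up || PySem.Str.isIn "TRACEBACK" up) && c1.isNone then
        some (PySem.Str.slice (PySem.Str.strip line) none (some 200))
      else c1)
    none

-- ===== PRECONDITION & SPEC =====
def Spec_first_error_in_last_run_py (lines : List String) (out : Option String) : Prop := out = first_error_in_last_run_py_alt lines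
instance (lines : List String) (out : Option String) : Decidable (Spec_first_error_in_last_run_py lines out) := by unfold Spec_first_error_in_last_run_py; infer_instance

-- ===== CLAIM (what is proved, stated in full; the proofs are below) =====
def Claim_equal_first_error_in_last_run_py : Prop := ∀ (lines : List String), Dom_first_error_in_last_run_py lines → Spec_first_error_in_last_run_py lines (first_error_in_last_run_py lines)

-- ===== LEMMAS AND PROOFS =====

def pvMarker (line : String) : Bool :=
  let l := PySem.Str.lower line
  PySem.Str.isIn "starting" l || PySem.Str.isIn "watchdog run" l

def pvErr (line : String) : Bool :=
  let up := PySem.Str.upper line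
  PySem.Str.isIn "ERROR:" up || PySem.Str.isIn "TRACEBACK" up

def pvTrunc (line : String) : String :=
  PySem.Str.slice (PySem.Str.strip line) none (some 200)

def pvStepB (c : Option String) (line : String) : Option String :=
  let c1 := if pvMarker line then none else c
  if pvErr line && c1.isNone then some (pvTrunc line) else c1

-- the ports, re-read through the named helpers (definitional)
lemma pvPortA_eq (lines : List String) :
    first_error_in_last_run_py lines =
      pvScanErr (PySem.List.slice lines
        (some ((PySem.List.enumerate lines 0).foldl
          (fun s p => if pvMarker p.2 then p.1 else s) 0)) none) := rfl

lemma pvPortB_eq (lines : List String) :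
    first_error_in_last_run_py_alt lines = lines.foldl pvStepB none := rfl

lemma pvScanErr_cons (x : String) (r : List String) :
    pvScanErr (x :: r) = if pvErr x then some (pvTrunc x) else pvScanErr r := rfl

-- index of the last marker line, if any
def pvLastM : List String → Option Nat
  | [] => none
  | x :: r =>
    match pvLastM r with
    | some k => some (k + 1)
    | none => if pvMarker x then some 0 else none

-- A's first loop, Nat version
def pvNatFold : List String → Nat → Nat → Nat
  | [], _, a => a
  | x :: r, s, a => pvNatFold r (s + 1) (if pvMarker x then s else a)

lemma pvFoldA_eq_natFold : ∀ (xs : List String) (s a : Nat),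
    (PySem.List.enumerate xs (s : Int)).foldl
      (fun s p => if pvMarker p.2 then p.1 else s) (a : Int)
    = ((pvNatFold xs s a : Nat) : Int) := by
  intro xs
  induction xs with
  | nil => intro s a; simp [pvNatFold, PySem.List.enumerate_nil]
  | cons x r ih =>
    intro s a
    rw [PySem.List.enumerate_cons]
    simp only [List.foldl_cons, pvNatFold]
    by_cases h : pvMarker x
    · rw [if_pos h, if_pos h]
      have := ih (s + 1) s
      push_cast at this ⊢
      exact this
    · rw [if_neg h, if_neg h]
      have := ih (s + 1) a
      push_cast at this ⊢
      exact this

lemma pvNatFold_eq_lastM : ∀ (xs : List String) (s a : Nat),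
    pvNatFold xs s a = match pvLastM xs with
      | some k => s + k
      | none => a := by
  intro xs
  induction xs with
  | nil => intro s a; simp [pvNatFold, pvLastM]
  | cons x r ih =>
    intro s a
    simp only [pvNatFold, pvLastM]
    rw [ih]
    cases h : pvLastM r with
    | some k =>
      show s + 1 + k = s + (k + 1)
      omega
    | none =>
      by_cases hm : pvMarker x
      · simp [hm]
      · simp [hm]

-- B's fold characterised by the last marker index
lemma pvFoldB_char : ∀ (xs : List String) (c : Option String),
    xs.foldl pvStepB c
    = match pvLastM xs with
      | some k => pvScanErr (xs.drop k)
      | none => match c with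
        | some v => some v
        | none => pvScanErr xs := by
  intro xs
  induction xs with
  | nil => intro c; cases c <;> simp [pvLastM, pvScanErr]
  | cons x r ih =>
    intro c
    simp only [List.foldl_cons]
    rw [ih]
    simp only [pvLastM]
    cases h : pvLastM r with
    | some k => simp
    | none =>
      by_cases hm : pvMarker x
      · simp only [hm, if_true, pvStepB, pvScanErr_cons, List.drop_zero]
        by_cases he : pvErr x
        · simp [he]
        · simp [he]
      · simp only [hm, pvStepB, pvScanErr_cons, if_false, Bool.false_eq_true]
        cases c with
        | some v =>
          by_cases he : pvErr x <;> simp [he]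
        | none =>
          by_cases he : pvErr x
          · simp [he]
          · simp [he]

-- ===== VERDICT (by name: the statement is the Claim_ definition above) =====
theorem first_error_in_last_run_py_spec : Claim_equal_first_error_in_last_run_py := by
  intro lines _
  unfold Spec_first_error_in_last_run_py
  rw [pvPortA_eq, pvPortB_eq, pvFoldB_char lines none]
  have hA := pvFoldA_eq_natFold lines 0 0
  rw [show ((0 : Nat) : Int) = (0 : Int) from rfl] at hA
  rw [hA, PySem.List.slice_from _ (by positivity), Int.toNat_natCast,
    pvNatFold_eq_lastM]
  cases h : pvLastM lines with
  | some k => simp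
  | none => simp
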